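-- pv_equiv track=rewrite | github.com/ShuaiLyu0110/SQL-o1 | reasoners/t2s/agent.py | delexical
-- ===== SOURCE A (Python) =====
-- def delexical(query):
--     values = {}
--     new_query = ""
--     in_value = False
--     in_col = False
--     value = ""
--     placeholder_id = 0
--     new_query = ""
--     for char in query:
--         if char == "'":
--             in_value = not in_value
--             value += char
--             if not in_value:
--                 values[f"value_{placeholder_id}"] = value
--                 new_query += f"value_{placeholder_id}"
--                 placeholder_id += 1
--                 value = ""
--         else:
--             if not in_value:
--                 new_query += char
--             else:
--                 value += char
--     return new_query, values
-- ===== SOURCE B (Python) =====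
-- def delexical(query):
--     parts = query.split("'")
--     values = {}
--     pieces = [parts[0]]
--     pid = 0
--     rest = parts[1:]
--     while len(rest) >= 2:
--         key = f"value_{pid}"
--         values[key] = f"'{rest[0]}'"
--         pieces.append(key)
--         pieces.append(rest[1])
--         pid += 1
--         rest = rest[2:]
--     return "".join(pieces), values
-- ===== Notes on version B (the rewrite author's own statement) =====
-- stated objective: faster
-- what changed: B replaces A's per-character state machine (in_value flag, char-by-char string concatenation) with a split on the quote character followed by a loop consuming the parts two at a time (literal, following text), joining the pieces at the end; the pair loop drops an unterminated trailing literal naturally.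
import Mathlib
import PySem

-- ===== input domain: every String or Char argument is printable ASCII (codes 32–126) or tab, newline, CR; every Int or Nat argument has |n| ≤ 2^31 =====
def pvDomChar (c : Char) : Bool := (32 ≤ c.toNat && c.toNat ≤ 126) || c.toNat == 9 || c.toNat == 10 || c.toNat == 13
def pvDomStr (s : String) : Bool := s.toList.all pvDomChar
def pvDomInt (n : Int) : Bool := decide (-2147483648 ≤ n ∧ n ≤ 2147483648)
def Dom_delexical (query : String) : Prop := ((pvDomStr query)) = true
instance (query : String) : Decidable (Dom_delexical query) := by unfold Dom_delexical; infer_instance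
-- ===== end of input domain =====

-- B replaces A's per-character in_value state machine with split-on-quote and a loop over the parts two at a time; same cost, plainer structure.

-- ===== PORT A =====
-- the for-loop of A as structural recursion over the characters, same state
-- (values, new_query, in_value, value, placeholder_id); strings kept as List Char
def delexLoopA (cs : List Char) (values : PySem.Dict String String) (nq : List Char)
    (inv : Bool) (val : List Char) (pid : Int) : PySem.Dict String String × List Char :=
  match cs with
  | [] => (values, nq)
  | c :: rest =>
    if c = '\'' then
      let inv' := !inv
      let val' := val ++ [c]
      if !inv' then
        delexLoopA rest
          (values.insert ("value_" ++ PySem.Int.toStr pid) (String.ofList val'))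
          (nq ++ ("value_" ++ PySem.Int.toStr pid).toList) inv' [] (pid + 1)
      else
        delexLoopA rest values nq inv' val' pid
    else
      if !inv then delexLoopA rest values (nq ++ [c]) inv val pid
      else delexLoopA rest values nq inv (val ++ [c]) pid

def delexical (query : String) : String × (List (String × String)) :=
  let r := delexLoopA query.toList PySem.Dict.empty [] false [] 0
  (String.ofList r.2, r.1.items)

-- ===== PORT B =====
-- hand port of query.split("'") (step for step; exact: splits at every quote char)
def splitQuote : List Char → List (List Char)
  | [] => [[]]
  | c :: cs =>
    if c = '\'' then [] :: splitQuote cs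
    else
      match splitQuote cs with
      | [] => [[c]]
      | p :: ps => (c :: p) :: ps

-- the while-loop of B: consume (literal, following text) pairs of parts
def delexAltLoop (rest : List (List Char)) (pid : Int)
    (values : PySem.Dict String String) (pieces : List Char) :
    PySem.Dict String String × List Char :=
  match rest with
  | lit :: after :: rest' =>
    let key := "value_" ++ PySem.Int.toStr pid
    delexAltLoop rest' (pid + 1)
      (values.insert key (String.ofList ('\'' :: (lit ++ ['\'']))))
      (pieces ++ key.toList ++ after)
  | _ => (values, pieces)

def delexical_alt (query : String) : String × (List (String × String)) :=
  let parts := splitQuote query.toList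
  let r := delexAltLoop parts.tail 0 PySem.Dict.empty (parts.headD [])
  (String.ofList r.2, r.1.items)

-- ===== PRECONDITION & SPEC =====
def Spec_delexical (query : String) (out : String × (List (String × String))) : Prop := out = delexical_alt query
instance (query : String) (out : String × (List (String × String))) : Decidable (Spec_delexical query out) := by unfold Spec_delexical; infer_instance

-- ===== CLAIM (what is proved, stated in full; the proofs are below) =====
def Claim_equal_delexical : Prop := ∀ (query : String), Dom_delexical query → Spec_delexical query (delexical query)

-- ===== LEMMAS AND PROOFS =====
theorem splitQuote_ne_nil (cs : List Char) : splitQuote cs ≠ [] := by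
  cases cs with
  | nil => simp [splitQuote]
  | cons c cs =>
    simp only [splitQuote]
    split
    · simp
    · split <;> simp

-- simultaneous characterisation of A's loop from the two reachable shapes of state:
-- outside a literal (inv = false, val = []) it behaves like B's pair loop on the parts;
-- inside a literal (inv = true) it first closes the current literal, then continues.
theorem delexLoopA_eq (cs : List Char) :
    (∀ (values : PySem.Dict String String) (nq : List Char) (pid : Int),
      delexLoopA cs values nq false [] pid =
        match splitQuote cs with
        | p :: rest => delexAltLoop rest pid values (nq ++ p)
        | [] => (values, nq)) ∧
    (∀ (values : PySem.Dict String String) (nq val : List Char) (pid : Int),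
      delexLoopA cs values nq true val pid =
        match splitQuote cs with
        | lit :: after :: rest =>
          delexAltLoop rest (pid + 1)
            (values.insert ("value_" ++ PySem.Int.toStr pid) (String.ofList (val ++ lit ++ ['\''])))
            (nq ++ ("value_" ++ PySem.Int.toStr pid).toList ++ after)
        | _ => (values, nq)) := by
  induction cs with
  | nil => constructor <;> intros <;> simp [delexLoopA, splitQuote, delexAltLoop]
  | cons c cs ih =>
    obtain ⟨ihP, ihQ⟩ := ih
    constructor
    · intro values nq pid
      by_cases hc : c = '\''
      · subst hc
        rw [show delexLoopA ('\'' :: cs) values nq false [] pid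
              = delexLoopA cs values nq true ['\''] pid by simp [delexLoopA]]
        rw [ihQ]
        simp only [splitQuote]
        cases h : splitQuote cs with
        | nil => exact absurd h (splitQuote_ne_nil cs)
        | cons lit rest =>
          cases rest with
          | nil => simp [delexAltLoop]
          | cons after rest' => simp [delexAltLoop]
      · rw [show delexLoopA (c :: cs) values nq false [] pid
              = delexLoopA cs values (nq ++ [c]) false [] pid by simp [delexLoopA, hc]]
        rw [ihP]
        simp only [splitQuote, if_neg hc]
        cases h : splitQuote cs with
        | nil => exact absurd h (splitQuote_ne_nil cs)
        | cons p ps => simp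
    · intro values nq val pid
      by_cases hc : c = '\''
      · subst hc
        rw [show delexLoopA ('\'' :: cs) values nq true val pid
              = delexLoopA cs
                  (values.insert ("value_" ++ PySem.Int.toStr pid) (String.ofList (val ++ ['\''])))
                  (nq ++ ("value_" ++ PySem.Int.toStr pid).toList) false [] (pid + 1)
            by simp [delexLoopA]]
        rw [ihP]
        simp only [splitQuote]
        cases h : splitQuote cs with
        | nil => exact absurd h (splitQuote_ne_nil cs)
        | cons p ps => simp
      · rw [show delexLoopA (c :: cs) values nq true val pid
              = delexLoopA cs values nq true (val ++ [c]) pid by simp [delexLoopA, hc]]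
        rw [ihQ]
        simp only [splitQuote, if_neg hc]
        cases h : splitQuote cs with
        | nil => exact absurd h (splitQuote_ne_nil cs)
        | cons lit rest =>
          cases rest with
          | nil => simp
          | cons after rest' => simp

-- ===== VERDICT (by name: the statement is the Claim_ definition above) =====
theorem delexical_spec : Claim_equal_delexical := by
  intro query _
  unfold Spec_delexical delexical delexical_alt
  rw [(delexLoopA_eq query.toList).1]
  cases h : splitQuote query.toList with
  | nil => exact absurd h (splitQuote_ne_nil query.toList)
  | cons p ps => simp
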